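-- pv_equiv track=rewrite | github.com/ncux-ad/peg_solver | analysis/symmetry.py | get_all_symmetries
-- ===== SOURCE A (Python) =====
-- from typing import FrozenSet, Tuple
--
-- Position = Tuple[int, int]
--
-- def rotate_90(positions: FrozenSet[Position], size: int = 7) -> FrozenSet[Position]:
--     """Поворот на 90° по часовой стрелке."""
--     return frozenset((c, size - 1 - r) for r, c in positions)
--
-- def flip_horizontal(positions: FrozenSet[Position], size: int = 7) -> FrozenSet[Position]:
--     """Отражение по горизонтали."""
--     return frozenset((r, size - 1 - c) for r, c in positions)
--
-- def get_all_symmetries(positions: FrozenSet[Position], size: int = 7) -> list: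
--     """
--     Генерирует все 8 симметрий позиции.
--     (4 поворота × 2 отражения)
--     """
--     symmetries = []
--     current = positions
--
--     for _ in range(4):
--         symmetries.append(current)
--         symmetries.append(flip_horizontal(current, size))
--         current = rotate_90(current, size)
--
--     return symmetries
-- ===== SOURCE B (Python) =====
-- def get_all_symmetries(positions, size=7):
--     """Eight dihedral symmetries via direct coordinate formulas, in the
--     order the rotate/flip loop produces them."""
--     n = size - 1
--     return [
--         positions,
--         frozenset((r, n - c) for r, c in positions),
--         frozenset((c, n - r) for r, c in positions),
--         frozenset((c, r) for r, c in positions),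
--         frozenset((n - r, n - c) for r, c in positions),
--         frozenset((n - r, c) for r, c in positions),
--         frozenset((n - c, r) for r, c in positions),
--         frozenset((n - c, n - r) for r, c in positions),
--     ]
-- ===== Notes on version B (the rewrite author's own statement) =====
-- stated objective: alternative
-- what changed: Replaces the loop that iteratively composes rotate_90/flip_horizontal (each symmetry built from the previous rotation) with eight independent one-pass comprehensions applying a direct closed-form coordinate map to the input set.
import Mathlib
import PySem

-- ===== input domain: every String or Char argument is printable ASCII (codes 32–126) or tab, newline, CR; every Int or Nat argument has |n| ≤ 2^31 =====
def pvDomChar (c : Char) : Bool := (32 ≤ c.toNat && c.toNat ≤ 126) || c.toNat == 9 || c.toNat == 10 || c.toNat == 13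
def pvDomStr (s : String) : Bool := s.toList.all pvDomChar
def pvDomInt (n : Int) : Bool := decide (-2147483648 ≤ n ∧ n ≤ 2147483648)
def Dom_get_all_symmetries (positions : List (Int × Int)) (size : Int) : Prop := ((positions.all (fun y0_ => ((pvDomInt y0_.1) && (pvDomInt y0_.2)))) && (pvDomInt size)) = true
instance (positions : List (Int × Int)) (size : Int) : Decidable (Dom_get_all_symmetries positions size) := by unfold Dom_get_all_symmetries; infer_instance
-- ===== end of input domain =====

-- B replaces A's rotate/flip composition loop by eight inlined closed-form coordinate
-- maps applied directly to the input (objective: alternative decomposition, same cost).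

-- ===== PORT A =====
-- frozenset((c, size - 1 - r) for r, c in positions)
def rotate_90 (positions : List (Int × Int)) (size : Int) : List (Int × Int) :=
  PySem.Set.ofList (positions.map (fun p => (p.2, size - 1 - p.1)))

-- frozenset((r, size - 1 - c) for r, c in positions)
def flip_horizontal (positions : List (Int × Int)) (size : Int) : List (Int × Int) :=
  PySem.Set.ofList (positions.map (fun p => (p.1, size - 1 - p.2)))

def get_all_symmetries (positions : List (Int × Int)) (size : Int) : List (List (Int × Int)) :=
  -- symmetries = []; current = positions; for _ in range(4): append current; append flipH(current); current = rotate_90(current)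
  ((List.range 4).foldl
    (fun (st : List (List (Int × Int)) × List (Int × Int)) _ =>
      (st.1 ++ [st.2, flip_horizontal st.2 size], rotate_90 st.2 size))
    ([], positions)).1

-- ===== PORT B =====
def get_all_symmetries_alt (positions : List (Int × Int)) (size : Int) : List (List (Int × Int)) :=
  let n := size - 1
  [positions,
   PySem.Set.ofList (positions.map (fun p => (p.1, n - p.2))),
   PySem.Set.ofList (positions.map (fun p => (p.2, n - p.1))),
   PySem.Set.ofList (positions.map (fun p => (p.2, p.1))),
   PySem.Set.ofList (positions.map (fun p => (n - p.1, n - p.2))),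
   PySem.Set.ofList (positions.map (fun p => (n - p.1, p.2))),
   PySem.Set.ofList (positions.map (fun p => (n - p.2, p.1))),
   PySem.Set.ofList (positions.map (fun p => (n - p.2, n - p.1)))]

-- ===== PRECONDITION & SPEC =====
def Spec_get_all_symmetries (positions : List (Int × Int)) (size : Int) (out : List (List (Int × Int))) : Prop := out = get_all_symmetries_alt positions size
instance (positions : List (Int × Int)) (size : Int) (out : List (List (Int × Int))) : Decidable (Spec_get_all_symmetries positions size out) := by unfold Spec_get_all_symmetries; infer_instance

-- ===== CLAIM (what is proved, stated in full; the proofs are below) =====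
def Claim_equal_get_all_symmetries : Prop := ∀ (positions : List (Int × Int)) (size : Int), Dom_get_all_symmetries positions size → Spec_get_all_symmetries positions size (get_all_symmetries positions size)

-- ===== LEMMAS AND PROOFS =====

theorem pv_map_add {α β : Type} [BEq α] [LawfulBEq α] [BEq β] [LawfulBEq β]
    (f : α → β) (hf : Function.Injective f) (s : List α) (a : α) :
    (PySem.Set.add s a).map f = PySem.Set.add (s.map f) (f a) := by
  have h2 : (f a ∈ s.map f) ↔ a ∈ s := by
    constructor
    · intro h
      obtain ⟨x, hx, hfx⟩ := List.mem_map.mp h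
      exact hf hfx ▸ hx
    · exact List.mem_map_of_mem
  by_cases hm : a ∈ s <;> simp [PySem.Set.add, hm, h2]

theorem pv_map_foldl_add {α β : Type} [BEq α] [LawfulBEq α] [BEq β] [LawfulBEq β]
    (f : α → β) (hf : Function.Injective f) :
    ∀ (l acc : List α), (l.foldl PySem.Set.add acc).map f
      = (l.map f).foldl PySem.Set.add (acc.map f)
  | [], acc => rfl
  | a :: l, acc => by
    simp only [List.foldl_cons, List.map_cons]
    rw [pv_map_foldl_add f hf l, pv_map_add f hf]

-- set() of an injectively mapped list is the mapped set() (first occurrences line up)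
theorem pv_ofList_map {α β : Type} [BEq α] [LawfulBEq α] [BEq β] [LawfulBEq β]
    (f : α → β) (hf : Function.Injective f) (l : List α) :
    PySem.Set.ofList (l.map f) = (PySem.Set.ofList l).map f := by
  rw [PySem.Set.ofList_eq_foldl, PySem.Set.ofList_eq_foldl, pv_map_foldl_add f hf]
  rfl

-- a comprehension over a set built from a comprehension collapses to one comprehension
theorem pv_nest {α β γ : Type} [BEq α] [LawfulBEq α] [BEq β] [LawfulBEq β] [BEq γ] [LawfulBEq γ]
    (t : β → γ) (ht : Function.Injective t) (g : α → β) (l : List α) :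
    PySem.Set.ofList ((PySem.Set.ofList (l.map g)).map t)
      = PySem.Set.ofList (l.map (fun a => t (g a))) := by
  rw [← pv_ofList_map t ht (l.map g), PySem.Set.ofList_ofList, List.map_map]
  rfl

theorem pv_rot_inj (size : Int) :
    Function.Injective (fun p : Int × Int => (p.2, size - 1 - p.1)) := by
  intro a b h
  simp only [Prod.mk.injEq] at h
  exact Prod.ext_iff.mpr ⟨by omega, h.1⟩

theorem pv_flip_inj (size : Int) :
    Function.Injective (fun p : Int × Int => (p.1, size - 1 - p.2)) := by
  intro a b h
  simp only [Prod.mk.injEq] at h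
  exact Prod.ext_iff.mpr ⟨h.1, by omega⟩

theorem pv_mapeq (l : List (Int × Int)) (f g : Int × Int → Int × Int)
    (h : ∀ r c : Int, f (r, c) = g (r, c)) :
    PySem.Set.ofList (l.map f) = PySem.Set.ofList (l.map g) := by
  refine congrArg _ (List.map_congr_left ?_)
  rintro ⟨r, c⟩ _
  exact h r c

-- ===== VERDICT (by name: the statement is the Claim_ definition above) =====
theorem get_all_symmetries_spec : Claim_equal_get_all_symmetries := by
  intro positions size _
  unfold Spec_get_all_symmetries
  show get_all_symmetries positions size = get_all_symmetries_alt positions size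
  have hr := pv_rot_inj size
  have hf := pv_flip_inj size
  simp only [get_all_symmetries, get_all_symmetries_alt, rotate_90, flip_horizontal,
    List.range, List.range.loop, List.foldl, List.nil_append, List.cons_append]
  rw [pv_nest _ hf _ positions, pv_nest _ hr _ positions,
    pv_nest _ hf _ positions, pv_nest _ hr _ positions,
    pv_nest _ hf _ positions]
  refine List.ext_getElem rfl ?_
  intro i h1 h2
  simp only [List.length_cons, List.length_nil] at h1
  interval_cases i <;>
    simp only [List.getElem_cons_zero, List.getElem_cons_succ] <;>
    first
      | rfl
      | (apply pv_mapeq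
         intro r c
         refine Prod.ext_iff.mpr ⟨by omega, by omega⟩)
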